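-- pv_equiv track=rewrite | github.com/stefano-ortona/google-kick-start | python/y2019/roundc/circuit_board.py | max_board
-- ===== SOURCE A (Python) =====
-- def max_board(board, k):
--     max_min_diff = compute_max_min_diff(board)
--     max_area = len(board)
--     for i in range(len(board)):
--         for start in range(len(board[0]) - 1):
--             for end in range(start + 1, len(board[0])):
--                 max_area = max(max_area, expand_row(i, k, start, end, max_min_diff))
--     return max_area
--
-- def expand_row(row, k, start, end, max_min_diff):
--     cur_area = 0
--     while row < len(max_min_diff) and max_min_diff[row][start][end] <= k:
--         cur_area += end - start + 1
--         row += 1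
--     return cur_area
--
-- def compute_max_min_diff(board):
--     max_min_diff = {}
--     for row in range(len(board)):
--         cur_board = [[0 for j in range(len(board[0]))] for i in range(len(board[0]))]
--         for i in range(len(board[0]) - 1):
--             min_el = board[row][i]
--             max_el = board[row][i]
--             for j in range(i + 1, len(board[0])):
--                 min_el = min(min_el, board[row][j])
--                 max_el = max(max_el, board[row][j])
--                 cur_board[i][j] = max_el - min_el
--         max_min_diff[row] = cur_board
--     return max_min_diff
-- ===== SOURCE B (Python) =====
-- def max_board(board, k):
--     # One pass per column pair: sliding per-row min/max vectors and a
--     # longest-consecutive-run scan replace A's restart-from-every-row expansion.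
--     rows = len(board)
--     cols = len(board[0]) if board else 0
--     best = rows
--     for start in range(cols - 1):
--         mins = [r[start] for r in board]
--         maxs = list(mins)
--         for end in range(start + 1, cols):
--             mins = [min(m, r[end]) for m, r in zip(mins, board)]
--             maxs = [max(m, r[end]) for m, r in zip(maxs, board)]
--             w = end - start + 1
--             run = 0
--             for mn, mx in zip(mins, maxs):
--                 if mx - mn <= k:
--                     run += 1
--                     best = max(best, run * w)
--                 else:
--                     run = 0
--     return best
-- ===== Notes on version B (the rewrite author's own statement) =====
-- stated objective: faster
-- what changed: Instead of precomputing a per-row spread table and re-expanding downward from every start row for every column pair (A), B iterates column pairs outermost, maintains sliding per-row min/max vectors, and finds the best rectangle for each pair with a single longest-consecutive-satisfying-row-run pass over the rows.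
import Mathlib
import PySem

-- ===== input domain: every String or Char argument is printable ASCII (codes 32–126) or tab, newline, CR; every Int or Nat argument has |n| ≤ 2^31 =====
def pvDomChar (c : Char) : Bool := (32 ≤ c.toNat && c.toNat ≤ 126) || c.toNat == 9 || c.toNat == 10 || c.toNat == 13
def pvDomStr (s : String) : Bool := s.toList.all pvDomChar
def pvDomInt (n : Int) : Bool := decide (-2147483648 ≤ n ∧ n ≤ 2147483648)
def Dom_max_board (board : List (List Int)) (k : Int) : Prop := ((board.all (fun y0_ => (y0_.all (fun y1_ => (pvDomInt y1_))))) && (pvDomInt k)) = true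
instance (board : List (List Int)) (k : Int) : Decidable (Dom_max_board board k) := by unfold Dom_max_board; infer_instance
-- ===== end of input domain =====

-- B replaces A's per-start-row re-expansion by one longest-consecutive-run pass per
-- column pair over sliding per-row min/max vectors (objective: faster, O(R*C^2) vs O(R^2*C^2)).
-- List indices produced by the loops are in range under Pre_; List.getD 0/[] is used for totality.

-- ===== PORT A =====
def pvZeros (cols : Nat) : List (List Int) :=
  (List.range cols).map (fun _ => (List.range cols).map (fun _ => (0 : Int)))

def pvInnerStep (r : List Int) (i : Nat) (st : Int × Int × List (List Int)) (j : Nat) :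
    Int × Int × List (List Int) :=
  let mn := min st.1 (r.getD j 0)
  let mx := max st.2.1 (r.getD j 0)
  (mn, mx, st.2.2.set i ((st.2.2.getD i []).set j (mx - mn)))

def pvRowTable (r : List Int) (cols : Nat) : List (List Int) :=
  (List.range (cols - 1)).foldl (fun cur i =>
      ((List.range' (i + 1) (cols - 1 - i)).foldl (pvInnerStep r i)
        (r.getD i 0, r.getD i 0, cur)).2.2)
    (pvZeros cols)

def computeMaxMinDiff (board : List (List Int)) : PySem.Dict Int (List (List Int)) :=
  (List.range board.length).foldl (fun mmd row =>
      mmd.insert (Int.ofNat row) (pvRowTable (board.getD row []) ((board.headD []).length)))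
    PySem.Dict.empty

def expandRow (k : Int) (s e : Nat) (mmd : PySem.Dict Int (List (List Int)))
    (row : Nat) (acc : Int) : Int :=
  if h : row < mmd.items.length ∧ ((mmd.getD (Int.ofNat row) []).getD s []).getD e 0 ≤ k then
    expandRow k s e mmd (row + 1) (acc + (Int.ofNat e - Int.ofNat s + 1))
  else acc
termination_by mmd.items.length - row
decreasing_by omega

def max_board (board : List (List Int)) (k : Int) : Int :=
  let mmd := computeMaxMinDiff board
  let cols := (board.headD []).length
  (List.range board.length).foldl (fun acc i =>
      (List.range (cols - 1)).foldl (fun acc s =>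
          (List.range' (s + 1) (cols - 1 - s)).foldl (fun acc e =>
              max acc (expandRow k s e mmd i 0)) acc) acc)
    ((board.length : Int))

-- ===== PORT B =====
def runStep (k w : Int) (rb : Int × Int) (p : Int × Int) : Int × Int :=
  if p.2 - p.1 ≤ k then (rb.1 + 1, max rb.2 ((rb.1 + 1) * w)) else (0, rb.2)

def pvColStep (board : List (List Int)) (k : Int) (s : Nat)
    (st : List Int × List Int × Int) (e : Nat) : List Int × List Int × Int :=
  let mins := (st.1.zip board).map (fun p => min p.1 (p.2.getD e 0))
  let maxs := (st.2.1.zip board).map (fun p => max p.1 (p.2.getD e 0))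
  let w : Int := Int.ofNat e - Int.ofNat s + 1
  let rb := (mins.zip maxs).foldl (runStep k w) (0, st.2.2)
  (mins, maxs, rb.2)

def max_board_alt (board : List (List Int)) (k : Int) : Int :=
  let rows := board.length
  let cols := (board.headD []).length
  (List.range (cols - 1)).foldl (fun best s =>
      let mins := board.map (fun r => r.getD s 0)
      ((List.range' (s + 1) (cols - 1 - s)).foldl (pvColStep board k s)
        (mins, mins, best)).2.2)
    ((rows : Int))

-- ===== PRECONDITION & SPEC =====
-- Pre_: with at least two columns, Python A indexes board[row][j] for j < len(board[0]) on
-- every row; it raises (IndexError) exactly when some row is shorter than the first row.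
def Pre_max_board (board : List (List Int)) (k : Int) : Prop :=
  board = [] ∨ (board.headD []).length ≤ 1 ∨ ∀ r ∈ board, (board.headD []).length ≤ r.length
instance (board : List (List Int)) (k : Int) : Decidable (Pre_max_board board k) := by
  unfold Pre_max_board; infer_instance

def pvWitness_max_board : List (List Int) × Int := ([[0, 3], [1, 2], [5, 5]], 2)

def Spec_max_board (board : List (List Int)) (k : Int) (out : Int) : Prop := out = max_board_alt board k
instance (board : List (List Int)) (k : Int) (out : Int) : Decidable (Spec_max_board board k out) := by unfold Spec_max_board; infer_instance

-- ===== CLAIM (what is proved, stated in full; the proofs are below) =====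
def Claim_equal_max_board : Prop := ∀ (board : List (List Int)) (k : Int), Dom_max_board board k → Pre_max_board board k → Spec_max_board board k (max_board board k)

-- ===== LEMMAS AND PROOFS =====

-- spec-side descriptions of the data both programs compute
def segMin (r : List Int) (s m : Nat) : Int :=
  (List.range' (s + 1) m).foldl (fun a j => min a (r.getD j 0)) (r.getD s 0)

def segMax (r : List Int) (s m : Nat) : Int :=
  (List.range' (s + 1) m).foldl (fun a j => max a (r.getD j 0)) (r.getD s 0)

def rowOK (k : Int) (s e : Nat) (r : List Int) : Bool :=
  decide (segMax r s (e - s) - segMin r s (e - s) ≤ k)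

def okList (board : List (List Int)) (k : Int) (s e : Nat) : List Bool :=
  board.map (rowOK k s e)

def pref : List Bool → Nat
  | [] => 0
  | b :: t => if b then pref t + 1 else 0

def maxRun : List Bool → Nat
  | [] => 0
  | b :: t => max (pref (b :: t)) (maxRun t)

def maxRunAux : Nat → List Bool → Nat
  | _, [] => 0
  | run, b :: t => if b then max (run + 1) (maxRunAux (run + 1) t) else maxRunAux 0 t

def supI {α : Type} (f : α → Int) (l : List α) : Int :=
  l.foldl (fun a x => max a (f x)) 0

-- the common value both programs compute
def pvVal (board : List (List Int)) (k : Int) : Int :=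
  let cols := (board.headD []).length
  max (board.length : Int)
    (supI (fun s => supI (fun e => (Int.ofNat e - Int.ofNat s + 1) * (maxRun (okList board k s e) : Int))
      (List.range' (s + 1) (cols - 1 - s))) (List.range (cols - 1)))

-- generic running-max lemmas
theorem foldl_max_shift {α : Type} (f : α → Int) (l : List α) (a : Int) :
    ∀ b, l.foldl (fun acc x => max acc (f x)) (max a b) =
      max a (l.foldl (fun acc x => max acc (f x)) b) := by
  induction l generalizing a with
  | nil => intro b; simp [List.foldl]
  | cons x t ih =>
      intro b
      show t.foldl _ (max (max a b) (f x)) = max a (t.foldl _ (max b (f x)))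
      rw [max_assoc, ih]

theorem supI_nonneg {α : Type} (f : α → Int) (l : List α) : 0 ≤ supI f l :=
  (PySem.List.le_foldl_max_int l f 0).1

theorem supI_cons {α : Type} (f : α → Int) (x : α) (t : List α) :
    supI f (x :: t) = max (f x) (supI f t) := by
  show t.foldl _ (max 0 (f x)) = _
  rw [max_comm 0 (f x), foldl_max_shift]
  rfl

theorem supI_append {α : Type} (f : α → Int) (l1 l2 : List α) :
    supI f (l1 ++ l2) = max (supI f l1) (supI f l2) := by
  induction l1 with
  | nil =>
      have h2 := supI_nonneg f l2
      simp only [List.nil_append]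
      show supI f l2 = max (supI f []) (supI f l2)
      show supI f l2 = max 0 (supI f l2)
      omega
  | cons x t ih => rw [List.cons_append, supI_cons, supI_cons, ih, max_assoc]

theorem supI_map {α β : Type} (f : β → Int) (g : α → β) (l : List α) :
    supI f (l.map g) = supI (fun x => f (g x)) l := by
  unfold supI
  rw [List.foldl_map]

theorem supI_congr {α : Type} (f g : α → Int) (l : List α) (h : ∀ x ∈ l, f x = g x) :
    supI f l = supI g l := by
  unfold supI
  exact PySem.List.foldl_congr_mem l _ _ 0 (fun acc x hx => by rw [h x hx])

theorem supI_zero {α : Type} (l : List α) : supI (fun _ => (0 : Int)) l = 0 := by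
  induction l with
  | nil => rfl
  | cons x t ih => rw [supI_cons, ih]; omega

theorem supI_max_distrib {α : Type} (u v : α → Int) (l : List α) :
    supI (fun x => max (u x) (v x)) l = max (supI u l) (supI v l) := by
  induction l with
  | nil => rfl
  | cons x t ih => rw [supI_cons, supI_cons, supI_cons, ih]; omega

theorem supI_swap {α β : Type} (g : α → β → Int) (l1 : List α) (l2 : List β) :
    supI (fun i => supI (g i) l2) l1 = supI (fun y => supI (fun i => g i y) l1) l2 := by
  induction l1 with
  | nil =>
      rw [show supI (fun i => supI (g i) l2) [] = 0 from rfl, ← supI_zero l2]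
      exact supI_congr _ _ l2 (fun y _ => rfl)
  | cons x t ih =>
      rw [supI_cons, ih, ← supI_max_distrib]
      exact supI_congr _ _ l2 (fun y _ => by rw [supI_cons])

theorem supI_mul_left {α : Type} (c : Int) (f : α → Int) (l : List α) (hc : 0 ≤ c) :
    supI (fun x => c * f x) l = c * supI f l := by
  induction l with
  | nil => simp [supI]
  | cons x t ih => rw [supI_cons, supI_cons, ih, mul_max_of_nonneg _ _ hc]

theorem foldl_max_of_pointwise {α : Type} (l : List α) (step : Int → α → Int) (H : α → Int)
    (h : ∀ acc x, 0 ≤ acc → x ∈ l → step acc x = max acc (H x)) :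
    ∀ acc, 0 ≤ acc → l.foldl step acc = max acc (supI H l) := by
  induction l generalizing H with
  | nil => intro acc hacc; show acc = max acc 0; omega
  | cons x t ih =>
      intro acc hacc
      have hx : step acc x = max acc (H x) := h acc x hacc List.mem_cons_self
      show t.foldl step (step acc x) = _
      rw [hx, ih H (fun a y ha hy => h a y ha (List.mem_cons_of_mem x hy)) _ (by omega),
        supI_cons]
      omega

-- run lemmas
theorem pref_le_maxRun (bs : List Bool) : pref bs ≤ maxRun bs := by
  cases bs with
  | nil => exact le_refl _
  | cons b t => exact le_max_left _ _

theorem maxRunAux_eq (bs : List Bool) : ∀ run,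
    maxRunAux run bs = max (if pref bs = 0 then 0 else run + pref bs) (maxRun bs) := by
  induction bs with
  | nil => intro run; rfl
  | cons b t ih =>
      intro run
      have hle := pref_le_maxRun t
      cases b with
      | false =>
          have h0 := ih 0
          show maxRunAux 0 t
            = max (if pref (false :: t) = 0 then 0 else run + pref (false :: t)) (maxRun (false :: t))
          rw [show maxRun (false :: t) = max (pref (false :: t)) (maxRun t) from rfl,
            show pref (false :: t) = 0 from rfl, if_pos rfl, h0]
          split_ifs <;> omega
      | true =>
          have ht := ih (run + 1)
          show max (run + 1) (maxRunAux (run + 1) t)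
            = max (if pref (true :: t) = 0 then 0 else run + pref (true :: t)) (maxRun (true :: t))
          rw [show maxRun (true :: t) = max (pref (true :: t)) (maxRun t) from rfl,
            show pref (true :: t) = pref t + 1 from rfl,
            if_neg (by omega : ¬ (pref t + 1 = 0)), ht]
          split_ifs <;> omega

theorem maxRunAux_zero (bs : List Bool) : maxRunAux 0 bs = maxRun bs := by
  rw [maxRunAux_eq bs 0]
  have h1 := pref_le_maxRun bs
  split_ifs with h <;> omega

theorem supI_pref_drop (bs : List Bool) :
    supI (fun i => (pref (bs.drop i) : Int)) (List.range bs.length) = (maxRun bs : Int) := by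
  induction bs with
  | nil => rfl
  | cons b t ih =>
      rw [List.length_cons, List.range_succ_eq_map, supI_cons, supI_map]
      have : supI (fun x => ((pref ((b :: t).drop (Nat.succ x)) : Nat) : Int)) (List.range t.length)
          = supI (fun i => ((pref (t.drop i) : Nat) : Int)) (List.range t.length) :=
        supI_congr _ _ _ (fun x _ => rfl)
      rw [this, ih]
      show max ((pref (b :: t) : Nat) : Int) _ = _
      rw [show maxRun (b :: t) = max (pref (b :: t)) (maxRun t) from rfl]
      push_cast [Nat.cast_max]
      rfl

-- B-side lemmas
theorem boolRun_snd (k w : Int) (hw : 0 ≤ w) (bs : List Bool) :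
    ∀ (run : Nat) (best : Int), 0 ≤ best →
      (bs.foldl (fun rb b => if b then (rb.1 + 1, max rb.2 ((rb.1 + 1) * w)) else (0, rb.2))
        (((run : Nat) : Int), best)).2 = max best (w * maxRunAux run bs) := by
  induction bs with
  | nil =>
      intro run best hbest
      show best = max best (w * 0)
      omega
  | cons b t ih =>
      intro run best hbest
      cases b with
      | false =>
          show (t.foldl _ (((0 : Nat) : Int), best)).2 = _
          rw [ih 0 best hbest]
          rfl
      | true =>
          show (t.foldl _ (((run : Nat) : Int) + 1, max best ((((run : Nat) : Int) + 1) * w))).2 = _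
          have hcast : ((run : Nat) : Int) + 1 = (((run + 1 : Nat) : Nat) : Int) := by push_cast; ring
          rw [hcast, ih (run + 1) _ (by omega)]
          show max (max best (((run + 1 : Nat) : Int) * w)) (w * (maxRunAux (run + 1) t : Int))
            = max best (w * (max (run + 1) (maxRunAux (run + 1) t) : Nat))
          rw [Nat.cast_max, mul_max_of_nonneg _ _ hw]
          rw [mul_comm w ((run + 1 : Nat) : Int)]
          push_cast
          omega

theorem segMin_succ (r : List Int) (s m : Nat) :
    segMin r s (m + 1) = min (segMin r s m) (r.getD (s + 1 + m) 0) := by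
  unfold segMin
  rw [List.range'_1_concat, List.foldl_append]
  rfl

theorem segMax_succ (r : List Int) (s m : Nat) :
    segMax r s (m + 1) = max (segMax r s m) (r.getD (s + 1 + m) 0) := by
  unfold segMax
  rw [List.range'_1_concat, List.foldl_append]
  rfl

theorem zip_map_left_self {α β δ : Type} (l : List α) (f : α → β) (h : β × α → δ) :
    ((l.map f).zip l).map h = l.map (fun x => h (f x, x)) := by
  induction l with
  | nil => rfl
  | cons x t ih => simpa using ih

theorem zip_map_pair {α β γ : Type} (l : List α) (f : α → β) (g : α → γ) :
    (l.map f).zip (l.map g) = l.map (fun x => (f x, g x)) := by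
  induction l with
  | nil => rfl
  | cons x t ih => simpa using ih

theorem colStep_eq (board : List (List Int)) (k : Int) (s m : Nat) (best : Int)
    (hbest : 0 ≤ best) :
    pvColStep board k s
      (board.map (fun r => segMin r s m), board.map (fun r => segMax r s m), best) (s + 1 + m)
    = (board.map (fun r => segMin r s (m + 1)), board.map (fun r => segMax r s (m + 1)),
        max best ((Int.ofNat (s + 1 + m) - Int.ofNat s + 1) *
          (maxRun (okList board k s (s + 1 + m)) : Int))) := by
  have hes : s + 1 + m - s = m + 1 := by omega
  have hw : (0 : Int) ≤ Int.ofNat (s + 1 + m) - Int.ofNat s + 1 := by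
    simp only [Int.ofNat_eq_natCast]; omega
  simp only [pvColStep]
  have hmins : ((board.map (fun r => segMin r s m)).zip board).map
      (fun p => min p.1 (p.2.getD (s + 1 + m) 0)) = board.map (fun r => segMin r s (m + 1)) := by
    rw [zip_map_left_self]
    exact List.map_congr_left (fun r _ => (segMin_succ r s m).symm)
  have hmaxs : ((board.map (fun r => segMax r s m)).zip board).map
      (fun p => max p.1 (p.2.getD (s + 1 + m) 0)) = board.map (fun r => segMax r s (m + 1)) := by
    rw [zip_map_left_self]
    exact List.map_congr_left (fun r _ => (segMax_succ r s m).symm)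
  rw [hmins, hmaxs, zip_map_pair, List.foldl_map]
  refine congrArg (fun z => (board.map (fun r => segMin r s (m + 1)),
    board.map (fun r => segMax r s (m + 1)), z)) ?_
  have hcongr : board.foldl
      (fun rb r => runStep k (Int.ofNat (s + 1 + m) - Int.ofNat s + 1) rb
        (segMin r s (m + 1), segMax r s (m + 1))) (0, best)
      = board.foldl (fun rb r => if rowOK k s (s + 1 + m) r then
          (rb.1 + 1, max rb.2 ((rb.1 + 1) * (Int.ofNat (s + 1 + m) - Int.ofNat s + 1)))
        else (0, rb.2)) (0, best) := by
    refine PySem.List.foldl_congr_mem board _ _ (0, best) (fun acc r _ => ?_)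
    simp only [runStep, rowOK, hes]
    by_cases hc : segMax r s (m + 1) - segMin r s (m + 1) ≤ k <;> simp [hc]
  rw [hcongr, show (((0 : Int), best)) = ((((0 : Nat) : Int)), best) by norm_num]
  have hfin := boolRun_snd k (Int.ofNat (s + 1 + m) - Int.ofNat s + 1) hw
    (okList board k s (s + 1 + m)) 0 best hbest
  rw [show okList board k s (s + 1 + m) = board.map (rowOK k s (s + 1 + m)) from rfl,
    List.foldl_map] at hfin
  rw [hfin, maxRunAux_zero]
  rfl

theorem colPass (board : List (List Int)) (k : Int) (s : Nat) :
    ∀ (m : Nat) (best : Int), 0 ≤ best →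
      (List.range' (s + 1) m).foldl (pvColStep board k s)
        (board.map (fun r => segMin r s 0), board.map (fun r => segMax r s 0), best)
      = (board.map (fun r => segMin r s m), board.map (fun r => segMax r s m),
          max best (supI (fun e => (Int.ofNat e - Int.ofNat s + 1) * (maxRun (okList board k s e) : Int))
            (List.range' (s + 1) m))) := by
  intro m
  induction m with
  | zero =>
      intro best hbest
      rw [List.range'_zero]
      show (_, _, best) = (_, _, max best (supI _ []))
      show (_, _, best) = (_, _, max best 0)
      rw [show max best 0 = best by omega]
  | succ m ih =>
      intro best hbest
      rw [List.range'_1_concat, List.foldl_append, ih best hbest]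
      show pvColStep board k s _ (s + 1 + m) = _
      have hb2 : (0 : Int) ≤ max best (supI (fun e => (Int.ofNat e - Int.ofNat s + 1) *
          (maxRun (okList board k s e) : Int)) (List.range' (s + 1) m)) := by
        have := supI_nonneg (fun e => (Int.ofNat e - Int.ofNat s + 1) *
          (maxRun (okList board k s e) : Int)) (List.range' (s + 1) m)
        omega
      rw [colStep_eq board k s m _ hb2]
      refine congrArg₂ Prod.mk rfl (congrArg₂ Prod.mk rfl ?_)
      rw [supI_append]
      have hsing : supI (fun e => (Int.ofNat e - Int.ofNat s + 1) *
          (maxRun (okList board k s e) : Int)) [s + 1 + m]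
          = (Int.ofNat (s + 1 + m) - Int.ofNat s + 1) *
            (maxRun (okList board k s (s + 1 + m)) : Int) := by
        have hnn : (0 : Int) ≤ (Int.ofNat (s + 1 + m) - Int.ofNat s + 1) *
            (maxRun (okList board k s (s + 1 + m)) : Int) := by
          apply mul_nonneg
          · simp only [Int.ofNat_eq_natCast]; omega
          · exact Int.natCast_nonneg _
        rw [supI_cons]
        show max _ 0 = _
        omega
      rw [hsing]
      have h1 := supI_nonneg (fun e => (Int.ofNat e - Int.ofNat s + 1) *
        (maxRun (okList board k s e) : Int)) (List.range' (s + 1) m)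
      have h2 : (0 : Int) ≤ (Int.ofNat (s + 1 + m) - Int.ofNat s + 1) *
          (maxRun (okList board k s (s + 1 + m)) : Int) := by
        apply mul_nonneg
        · simp only [Int.ofNat_eq_natCast]; omega
        · exact Int.natCast_nonneg _
      omega

theorem alt_eq_val (board : List (List Int)) (k : Int) :
    max_board_alt board k = pvVal board k := by
  unfold max_board_alt pvVal
  refine foldl_max_of_pointwise (List.range ((board.headD []).length - 1)) _
    (fun s => supI (fun e => (Int.ofNat e - Int.ofNat s + 1) *
      (maxRun (okList board k s e) : Int)) (List.range' (s + 1) ((board.headD []).length - 1 - s)))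
    ?_ _ (Int.natCast_nonneg _)
  intro acc s hacc hs
  have h := colPass board k s ((board.headD []).length - 1 - s) acc hacc
  show (((List.range' (s + 1) ((board.headD []).length - 1 - s)).foldl (pvColStep board k s)
    (board.map (fun r => segMin r s 0), board.map (fun r => segMax r s 0), acc)).2.2) = _
  rw [h]

-- A-side lemmas
theorem build_items (t : Nat → List (List Int)) (n : Nat) :
    ((List.range n).foldl (fun mmd row => mmd.insert (Int.ofNat row) (t row))
      PySem.Dict.empty).items = (List.range n).map (fun row => (Int.ofNat row, t row)) := by
  induction n with
  | zero => rfl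
  | succ n ih =>
      rw [List.range_succ, List.foldl_append, List.map_append]
      have hc : ((List.range n).foldl (fun mmd row => mmd.insert (Int.ofNat row) (t row))
          PySem.Dict.empty).contains (Int.ofNat n) = false := by
        rw [← Bool.not_eq_true, PySem.Dict.contains_iff_mem_keys]
        simp only [PySem.Dict.keys, ih]
        simp only [List.map_map, List.mem_map, Function.comp, List.mem_range,
          Int.ofNat_eq_natCast, Nat.cast_inj]
        rintro ⟨r, hr, hrn⟩
        omega
      show ((_ : PySem.Dict Int (List (List Int))).insert _ _).items = _
      rw [PySem.Dict.insert, hc]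
      simp only [Bool.false_eq_true, if_false, ih]
      rfl

theorem build_find (t : Nat → List (List Int)) (n row : Nat) (h : row < n) :
    List.find? (fun p => p.1 == Int.ofNat row)
      ((List.range n).map (fun r => (Int.ofNat r, t r))) = some (Int.ofNat row, t row) := by
  induction n with
  | zero => omega
  | succ n ih =>
      rw [List.range_succ, List.map_append, List.find?_append]
      by_cases hr : row < n
      · rw [ih hr]; rfl
      · have hrow : row = n := by omega
        subst hrow
        have hnone : List.find? (fun p => p.1 == Int.ofNat row)
            ((List.range row).map (fun r => (Int.ofNat r, t r))) = none := by
          rw [List.find?_eq_none]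
          rintro x hx
          rcases List.mem_map.mp hx with ⟨r, hr2, hxr⟩
          rw [← hxr]
          simp only [Int.ofNat_eq_natCast, beq_iff_eq, Nat.cast_inj]
          have := List.mem_range.mp hr2
          omega
        rw [hnone]
        simp

theorem build_getD (t : Nat → List (List Int)) (n row : Nat) (h : row < n) :
    ((List.range n).foldl (fun mmd r => mmd.insert (Int.ofNat r) (t r))
      PySem.Dict.empty).getD (Int.ofNat row) [] = t row := by
  show (Option.map (fun x => x.2) (List.find? (fun p => p.1 == Int.ofNat row)
    ((List.range n).foldl (fun mmd r => mmd.insert (Int.ofNat r) (t r))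
      PySem.Dict.empty).items)).getD [] = t row
  rw [build_items, build_find t n row h]
  rfl

theorem mmd_items (board : List (List Int)) :
    (computeMaxMinDiff board).items =
      (List.range board.length).map
        (fun row => ((Int.ofNat row), pvRowTable (board.getD row []) ((board.headD []).length))) :=
  build_items (fun row => pvRowTable (board.getD row []) ((board.headD []).length)) board.length

theorem mmd_length (board : List (List Int)) :
    (computeMaxMinDiff board).items.length = board.length := by
  rw [mmd_items, List.length_map, List.length_range]

theorem mmd_getD (board : List (List Int)) (row : Nat) (h : row < board.length) :
    (computeMaxMinDiff board).getD (Int.ofNat row) []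
      = pvRowTable (board.getD row []) ((board.headD []).length) :=
  build_getD (fun row => pvRowTable (board.getD row []) ((board.headD []).length)) board.length row h

def WFT (cur : List (List Int)) (cols : Nat) : Prop :=
  cur.length = cols ∧ ∀ a, a < cols → (cur.getD a []).length = cols

theorem getD_set {α : Type} (l : List α) (i a : Nat) (v d : α) :
    (l.set i v).getD a d = if i = a ∧ i < l.length then v else l.getD a d := by
  rw [List.getD_eq_getElem?_getD, List.getElem?_set, List.getD_eq_getElem?_getD]
  by_cases h1 : i = a
  · subst h1
    by_cases h2 : i < l.length
    · simp [h2]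
    · rw [List.getElem?_eq_none (by omega)]
      simp [h2]
  · simp [h1]

theorem zeros_eq_replicate (cols : Nat) :
    pvZeros cols = List.replicate cols (List.replicate cols (0 : Int)) := by
  simp [pvZeros]

theorem zeros_entry (cols a b : Nat) : (((pvZeros cols).getD a []).getD b 0 : Int) = 0 := by
  rw [zeros_eq_replicate]
  by_cases ha : a < cols
  · have houter : (List.replicate cols (List.replicate cols (0 : Int))).getD a []
        = List.replicate cols (0 : Int) := by
      rw [List.getD_eq_getElem?_getD, List.getElem?_replicate]
      simp [ha]
    rw [houter, List.getD_eq_getElem?_getD, List.getElem?_replicate]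
    by_cases hb : b < cols <;> simp [hb]
  · have houter : (List.replicate cols (List.replicate cols (0 : Int))).getD a [] = [] := by
      rw [List.getD_eq_getElem?_getD, List.getElem?_eq_none (by simp; omega)]
      rfl
    rw [houter]
    rfl

theorem zeros_WFT (cols : Nat) : WFT (pvZeros cols) cols := by
  rw [zeros_eq_replicate]
  constructor
  · simp
  · intro a ha
    rw [List.getD_eq_getElem?_getD, List.getElem?_replicate]
    simp [ha]

theorem inner_spec (r : List Int) (i cols : Nat) (hi : i < cols) :
    ∀ (m : Nat) (cur : List (List Int)), i + 1 + m ≤ cols → WFT cur cols →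
      ((List.range' (i + 1) m).foldl (pvInnerStep r i) (r.getD i 0, r.getD i 0, cur)).1
          = segMin r i m ∧
      ((List.range' (i + 1) m).foldl (pvInnerStep r i) (r.getD i 0, r.getD i 0, cur)).2.1
          = segMax r i m ∧
      WFT ((List.range' (i + 1) m).foldl (pvInnerStep r i) (r.getD i 0, r.getD i 0, cur)).2.2 cols ∧
      ∀ a b, ((((List.range' (i + 1) m).foldl (pvInnerStep r i)
            (r.getD i 0, r.getD i 0, cur)).2.2).getD a []).getD b 0
        = if a = i ∧ i + 1 ≤ b ∧ b < i + 1 + m then segMax r i (b - i) - segMin r i (b - i)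
          else (cur.getD a []).getD b 0 := by
  intro m
  induction m with
  | zero =>
      intro cur hm hwf
      rw [List.range'_zero]
      refine ⟨rfl, rfl, hwf, fun a b => ?_⟩
      rw [List.foldl_nil, if_neg (by omega)]
  | succ m ih =>
      intro cur hm hwf
      obtain ⟨h1, h2, h3, h4⟩ := ih cur (by omega) hwf
      rw [List.range'_1_concat, List.foldl_append]
      set p := (List.range' (i + 1) m).foldl (pvInnerStep r i) (r.getD i 0, r.getD i 0, cur)
        with hp
      rw [List.foldl_cons, List.foldl_nil]
      have hstep1 : (pvInnerStep r i p (i + 1 + m)).1 = segMin r i (m + 1) := by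
        show min p.1 (r.getD (i + 1 + m) 0) = _
        rw [h1, segMin_succ]
      have hstep2 : (pvInnerStep r i p (i + 1 + m)).2.1 = segMax r i (m + 1) := by
        show max p.2.1 (r.getD (i + 1 + m) 0) = _
        rw [h2, segMax_succ]
      have hval : max p.2.1 (r.getD (i + 1 + m) 0) - min p.1 (r.getD (i + 1 + m) 0)
          = segMax r i (m + 1) - segMin r i (m + 1) := by
        rw [h1, h2, segMin_succ, segMax_succ]
      have hrowlen : (p.2.2.getD i []).length = cols := h3.2 i hi
      have hlen : p.2.2.length = cols := h3.1
      have hcur : (pvInnerStep r i p (i + 1 + m)).2.2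
          = p.2.2.set i ((p.2.2.getD i []).set (i + 1 + m)
              (max p.2.1 (r.getD (i + 1 + m) 0) - min p.1 (r.getD (i + 1 + m) 0))) := rfl
      refine ⟨hstep1, hstep2, ?_, ?_⟩
      · constructor
        · rw [hcur, List.length_set, hlen]
        · intro a ha
          rw [hcur, getD_set]
          split_ifs with hcase
          · rw [List.length_set, hrowlen]
          · exact h3.2 a ha
      · intro a b
        rw [hcur, getD_set]
        by_cases hai : i = a
        · subst hai
          rw [if_pos ⟨rfl, by omega⟩, getD_set, hrowlen, h4 i b]
          have hib : i + 1 + m - i = m + 1 := by omega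
          by_cases hbj : i + 1 + m = b
          · rw [if_pos ⟨hbj, by omega⟩, if_pos (by omega), ← hbj, hib, hval]
          · rw [if_neg (by omega)]
            split_ifs with c1 c2 <;> try rfl
            · omega
            · omega
        · rw [if_neg (by omega), h4 a b]
          split_ifs with c1 c2 <;> try rfl
          · omega
          · omega

theorem table_spec (r : List Int) (cols : Nat) :
    ∀ n, n ≤ cols - 1 →
      WFT ((List.range n).foldl (fun cur i =>
          ((List.range' (i + 1) (cols - 1 - i)).foldl (pvInnerStep r i)
            (r.getD i 0, r.getD i 0, cur)).2.2) (pvZeros cols)) cols ∧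
      ∀ a b, ((((List.range n).foldl (fun cur i =>
            ((List.range' (i + 1) (cols - 1 - i)).foldl (pvInnerStep r i)
              (r.getD i 0, r.getD i 0, cur)).2.2) (pvZeros cols)).getD a []).getD b 0)
        = if a < n ∧ a + 1 ≤ b ∧ b < cols then segMax r a (b - a) - segMin r a (b - a) else 0 := by
  intro n
  induction n with
  | zero =>
      intro _
      refine ⟨zeros_WFT cols, fun a b => ?_⟩
      rw [List.range_zero]
      show ((pvZeros cols).getD a []).getD b 0 = _
      rw [zeros_entry, if_neg (by omega)]
  | succ n ih =>
      intro hn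
      obtain ⟨hwf, hent⟩ := ih (by omega)
      rw [List.range_succ, List.foldl_append, List.foldl_cons, List.foldl_nil]
      have hiC : n < cols := by omega
      have hm : n + 1 + (cols - 1 - n) ≤ cols := by omega
      obtain ⟨_, _, hwf', hent'⟩ := inner_spec r n cols hiC (cols - 1 - n) _ hm hwf
      refine ⟨hwf', fun a b => ?_⟩
      rw [hent' a b, hent a b]
      have : n + 1 + (cols - 1 - n) = cols := by omega
      by_cases hai : a = n
      · subst hai
        split_ifs with c1 c2 c3 <;> first | rfl | omega
      · split_ifs with c1 c2 c3 <;> first | rfl | omega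

theorem rowTable_entry (r : List Int) (cols s e : Nat) (hse : s + 1 ≤ e) (he : e < cols) :
    ((pvRowTable r cols).getD s []).getD e 0 = segMax r s (e - s) - segMin r s (e - s) := by
  have hmain := (table_spec r cols (cols - 1) (le_refl _)).2 s e
  unfold pvRowTable
  rw [hmain, if_pos ⟨by omega, hse, he⟩]

theorem expandRow_eq (board : List (List Int)) (k : Int) (s e : Nat)
    (hse : s + 1 ≤ e) (he : e < (board.headD []).length) :
    ∀ (row : Nat) (acc : Int),
      expandRow k s e (computeMaxMinDiff board) row acc
        = acc + (Int.ofNat e - Int.ofNat s + 1) * (pref ((okList board k s e).drop row) : Int) := by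
  have main : ∀ (n row : Nat) (acc : Int), board.length - row = n →
      expandRow k s e (computeMaxMinDiff board) row acc
        = acc + (Int.ofNat e - Int.ofNat s + 1) * (pref ((okList board k s e).drop row) : Int) := by
    intro n
    induction n with
    | zero =>
        intro row acc hrow
        rw [expandRow, dif_neg (by rw [mmd_length]; omega)]
        have hdrop : (okList board k s e).drop row = [] := by
          apply List.drop_eq_nil_of_le
          rw [show (okList board k s e).length = board.length from by
            unfold okList; simp]
          omega
        rw [hdrop]
        show acc = acc + _ * ((0 : Nat) : Int)
        push_cast
        ring
    | succ n ih =>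
        intro row acc hrow
        have hrlt : row < board.length := by omega
        have hentry : (((computeMaxMinDiff board).getD (Int.ofNat row) []).getD s []).getD e 0
            = segMax (board.getD row []) s (e - s) - segMin (board.getD row []) s (e - s) := by
          rw [mmd_getD board row hrlt, rowTable_entry _ _ s e hse he]
        have hdrop : (okList board k s e).drop row
            = rowOK k s e board[row] :: (okList board k s e).drop (row + 1) := by
          show (board.map (rowOK k s e)).drop row
            = rowOK k s e board[row] :: (board.map (rowOK k s e)).drop (row + 1)
          rw [← List.map_drop, ← List.map_drop, List.drop_eq_getElem_cons hrlt, List.map_cons]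
        have hgetD : board.getD row [] = board[row] := List.getD_eq_getElem board [] hrlt
        by_cases hk : segMax board[row] s (e - s) - segMin board[row] s (e - s) ≤ k
        · rw [expandRow, dif_pos ⟨by rw [mmd_length]; omega, by rw [hentry, hgetD]; exact hk⟩,
            ih (row + 1) _ (by omega), hdrop]
          rw [show rowOK k s e board[row] = true from decide_eq_true hk]
          show acc + _ + _ * ((pref ((okList board k s e).drop (row + 1)) : Nat) : Int)
            = acc + _ * (((pref ((okList board k s e).drop (row + 1)) + 1 : Nat) : Nat) : Int)
          push_cast
          ring
        · rw [expandRow, dif_neg (by rw [hentry, hgetD]; intro hc; exact hk hc.2), hdrop]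
          rw [show rowOK k s e board[row] = false from decide_eq_false hk]
          show acc = acc + _ * ((0 : Nat) : Int)
          push_cast
          ring
  exact fun row acc => main (board.length - row) row acc rfl

theorem a_eq_val (board : List (List Int)) (k : Int) :
    max_board board k = pvVal board k := by
  have e1 : max_board board k = (List.range board.length).foldl (fun acc i =>
      (List.range ((board.headD []).length - 1)).foldl (fun acc s =>
        (List.range' (s + 1) ((board.headD []).length - 1 - s)).foldl (fun acc e =>
          max acc (expandRow k s e (computeMaxMinDiff board) i 0)) acc) acc)
      ((board.length : Int)) := rfl
  have hpt : ∀ (acc : Int) (i : Nat), 0 ≤ acc → i ∈ List.range board.length →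
      (List.range ((board.headD []).length - 1)).foldl (fun acc s =>
        (List.range' (s + 1) ((board.headD []).length - 1 - s)).foldl (fun acc e =>
          max acc (expandRow k s e (computeMaxMinDiff board) i 0)) acc) acc
      = max acc (supI (fun s => supI (fun e => expandRow k s e (computeMaxMinDiff board) i 0)
          (List.range' (s + 1) ((board.headD []).length - 1 - s)))
          (List.range ((board.headD []).length - 1))) := by
    intro acc i hacc _
    refine foldl_max_of_pointwise _ _ _ (fun acc2 s hacc2 _ => ?_) acc hacc
    exact foldl_max_of_pointwise _ _ _ (fun a x ha hx => rfl) acc2 hacc2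
  have hA := foldl_max_of_pointwise (List.range board.length) _
    (fun i => supI (fun s => supI (fun e => expandRow k s e (computeMaxMinDiff board) i 0)
      (List.range' (s + 1) ((board.headD []).length - 1 - s)))
      (List.range ((board.headD []).length - 1)))
    hpt ((board.length : Int)) (Int.natCast_nonneg _)
  rw [e1, hA]
  unfold pvVal
  refine congrArg (fun z => max ((board.length : Int)) z) ?_
  rw [supI_swap (fun i s => supI (fun e => expandRow k s e (computeMaxMinDiff board) i 0)
    (List.range' (s + 1) ((board.headD []).length - 1 - s))) (List.range board.length)
    (List.range ((board.headD []).length - 1))]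
  refine supI_congr _ _ _ (fun st hst => ?_)
  rw [supI_swap (fun i e => expandRow k st e (computeMaxMinDiff board) i 0)
    (List.range board.length) (List.range' (st + 1) ((board.headD []).length - 1 - st))]
  refine supI_congr _ _ _ (fun e het => ?_)
  have hs1 : st < (board.headD []).length - 1 := List.mem_range.mp hst
  have he1 : st + 1 ≤ e ∧ e < st + 1 + ((board.headD []).length - 1 - st) :=
    List.mem_range'_1.mp het
  have hse : st + 1 ≤ e := he1.1
  have hec : e < (board.headD []).length := by omega
  have step1 : supI (fun i => expandRow k st e (computeMaxMinDiff board) i 0)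
      (List.range board.length)
      = supI (fun i => (Int.ofNat e - Int.ofNat st + 1) *
          (pref ((okList board k st e).drop i) : Int)) (List.range board.length) := by
    refine supI_congr _ _ _ (fun i _ => ?_)
    rw [expandRow_eq board k st e hse hec i 0, zero_add]
  rw [step1, supI_mul_left _ _ _ (by rw [Int.ofNat_eq_natCast, Int.ofNat_eq_natCast]; omega)]
  rw [show List.range board.length = List.range (okList board k st e).length from by
    unfold okList; simp]
  rw [supI_pref_drop]

-- ===== VERDICT (by name: the statement is the Claim_ definition above) =====
theorem max_board_spec : Claim_equal_max_board := by
  intro board k _ _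
  unfold Spec_max_board
  rw [a_eq_val, alt_eq_val]
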